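-- pv_equiv track=rewrite | github.com/eliottcassidy2000/math | 04-computation/beta2_extreme_deficit.py | find_DT_paths
-- ===== SOURCE A (Python) =====
-- def find_DT_paths(A, n):
--     dt = []
--     for a in range(n):
--         for b in range(n):
--             if b == a or not A[a][b]: continue
--             for c in range(n):
--                 if c == a or c == b or not A[b][c]: continue
--                 if not A[a][c]: continue
--                 for d in range(n):
--                     if d == a or d == b or d == c or not A[c][d]: continue
--                     if A[b][d]:
--                         dt.append((a,b,c,d))
--     return dt
-- ===== SOURCE B (Python) =====
-- def find_DT_paths(A, n):
--     # Bitset algorithm: each row of A becomes one integer bitmask; the cross-edge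
--     # conditions become integer ANDs of whole rows, and each loop walks the set
--     # bits of one intersection mask (ascending), instead of scanning range(n)
--     # with per-entry matrix lookups.
--     row = []
--     for v in range(n):
--         m = 0
--         for u in range(n):
--             if A[v][u]:
--                 m |= 1 << u
--         row.append(m)
--
--     def bits(m):
--         # ascending positions of the set bits of m
--         out = []
--         i = 0
--         while m:
--             if m & 1:
--                 out.append(i)
--             m >>= 1
--             i += 1
--         return out
--
--     dt = []
--     for a in range(n):
--         for b in bits(row[a]):
--             if b == a:
--                 continue
--             for c in bits(row[a] & row[b]):
--                 if c == a or c == b: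
--                     continue
--                 for d in bits(row[b] & row[c]):
--                     if d == a or d == b or d == c:
--                         continue
--                     dt.append((a, b, c, d))
--     return dt
-- ===== Notes on version B (the rewrite author's own statement) =====
-- stated objective: alternative
-- what changed: B re-encodes the adjacency matrix as one integer bitmask per row; the cross-edge conditions A[a][c], A[b][c], A[c][d], A[b][d] become whole-row integer ANDs (row[a]&row[b], row[b]&row[c]) and each inner loop enumerates the set bits of one intersection mask in ascending order via shift-and-test, instead of A's four full range(n) scans with per-entry matrix lookups.
-- outside the precondition, e.g. on find_DT_paths([], 1): A returns [], B raises IndexError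
import Mathlib
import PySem

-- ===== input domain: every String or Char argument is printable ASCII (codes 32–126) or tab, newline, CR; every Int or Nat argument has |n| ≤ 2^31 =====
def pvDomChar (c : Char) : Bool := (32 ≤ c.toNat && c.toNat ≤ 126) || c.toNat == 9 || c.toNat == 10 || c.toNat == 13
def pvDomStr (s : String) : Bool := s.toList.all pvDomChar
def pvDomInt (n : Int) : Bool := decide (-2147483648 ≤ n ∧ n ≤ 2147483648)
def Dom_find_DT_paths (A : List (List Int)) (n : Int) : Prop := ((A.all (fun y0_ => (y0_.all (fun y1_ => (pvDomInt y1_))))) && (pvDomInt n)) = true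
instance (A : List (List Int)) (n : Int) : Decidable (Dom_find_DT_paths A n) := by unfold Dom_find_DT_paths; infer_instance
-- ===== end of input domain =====

-- B re-encodes each row of A as one integer bitmask; cross-edge tests become whole-row ANDs and the
-- inner loops enumerate set bits of intersection masks (ascending), instead of four range-n scans
-- with per-entry matrix lookups. Same output is proved on Pre_.

-- ===== PORT A =====
-- A[i][j]; pyGetD is exact on Pre_ (all indices used are in range there)
def pvGetA (A : List (List Int)) (i j : Int) : Int :=
  PySem.List.pyGetD (PySem.List.pyGetD A i []) j 0

def find_DT_paths (A : List (List Int)) (n : Int) : List (Int × Int × Int × Int) :=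
  (PySem.List.pyRange 0 n 1).foldl (fun dt a =>
    (PySem.List.pyRange 0 n 1).foldl (fun dt b =>
      if b = a ∨ pvGetA A a b = 0 then dt else
      (PySem.List.pyRange 0 n 1).foldl (fun dt c =>
        if c = a ∨ c = b ∨ pvGetA A b c = 0 then dt else
        if pvGetA A a c = 0 then dt else
        (PySem.List.pyRange 0 n 1).foldl (fun dt d =>
          if d = a ∨ d = b ∨ d = c ∨ pvGetA A c d = 0 then dt else
          if pvGetA A b d ≠ 0 then dt ++ [(a, b, c, d)] else dt) dt) dt) dt) []

-- ===== PORT B =====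
-- 'm = 0; for u in range(n): if A[v][u]: m |= 1 << u'.  The Python mask is a nonnegative int,
-- so Nat with |||/<<< is exact.
def pvRowMask (A : List (List Int)) (v n : Int) : Nat :=
  (PySem.List.pyRange 0 n 1).foldl (fun m u =>
    if pvGetA A v u ≠ 0 then m ||| (1 <<< u.toNat) else m) 0

-- 'row = []; for v in range(n): row.append(...)'
def pvRows (A : List (List Int)) (n : Int) : List Nat :=
  (PySem.List.pyRange 0 n 1).foldl (fun row v => row ++ [pvRowMask A v n]) []

-- 'def bits(m): out=[]; i=0; while m: if m & 1: out.append(i); m >>= 1; i += 1; return out'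
-- (the while-loop with accumulator, as ascending structural recursion on m; m & 1 == 1 iff m % 2 = 1)
def pvBits (m i : Nat) : List Nat :=
  if m = 0 then [] else (if m % 2 = 1 then [i] else []) ++ pvBits (m / 2) (i + 1)
  decreasing_by exact Nat.bitwise_rec_lemma (by assumption)

def find_DT_paths_alt (A : List (List Int)) (n : Int) : List (Int × Int × Int × Int) :=
  let row := pvRows A n   -- row[v] looked up with pyGetD; indices are in range (bits set only below n)
  (PySem.List.pyRange 0 n 1).foldl (fun dt a =>
    (pvBits (PySem.List.pyGetD row a 0) 0).foldl (fun dt b =>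
      if (b : Int) = a then dt else
      (pvBits (PySem.List.pyGetD row a 0 &&& PySem.List.pyGetD row (b : Int) 0) 0).foldl (fun dt c =>
        if (c : Int) = a ∨ (c : Int) = (b : Int) then dt else
        (pvBits (PySem.List.pyGetD row (b : Int) 0 &&& PySem.List.pyGetD row (c : Int) 0) 0).foldl (fun dt d =>
          if (d : Int) = a ∨ (d : Int) = (b : Int) ∨ (d : Int) = (c : Int) then dt else
          dt ++ [(a, (b : Int), (c : Int), (d : Int))]) dt) dt) dt) []

-- ===== PRECONDITION & SPEC =====
-- Pre_ requires the first n rows to form a full n×n block (all entries A[i][j], 0 ≤ i,j < n, exist);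
-- this excludes a few degenerate undersized inputs A happens to accept because its guards skip every
-- lookup (e.g. n = 1 with A = []), on which B's mask-building pass raises IndexError.
def Pre_find_DT_paths (A : List (List Int)) (n : Int) : Prop :=
  0 < n → (n ≤ (A.length : Int) ∧ ∀ row ∈ A.take n.toNat, n ≤ (row.length : Int))
instance (A : List (List Int)) (n : Int) : Decidable (Pre_find_DT_paths A n) := by
  unfold Pre_find_DT_paths; infer_instance

def pvWitness_find_DT_paths : List (List Int) × Int := ([[0, 1], [1, 0]], 2)

def Spec_find_DT_paths (A : List (List Int)) (n : Int) (out : List (Int × Int × Int × Int)) : Prop := out = find_DT_paths_alt A n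
instance (A : List (List Int)) (n : Int) (out : List (Int × Int × Int × Int)) : Decidable (Spec_find_DT_paths A n out) := by unfold Spec_find_DT_paths; infer_instance

-- ===== CLAIM (what is proved, stated in full; the proofs are below) =====
def Claim_equal_find_DT_paths : Prop := ∀ (A : List (List Int)) (n : Int), Dom_find_DT_paths A n → Pre_find_DT_paths A n → Spec_find_DT_paths A n (find_DT_paths A n)

-- ===== LEMMAS AND PROOFS =====

-- a guarded append-loop is a filter+flatMap
theorem pvFoldlGuard {α β : Type} (l : List α) (p : α → Prop) [DecidablePred p]
    (g : α → List β) (acc : List β) :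
    l.foldl (fun dt x => if p x then dt ++ g x else dt) acc
      = acc ++ (l.filter (fun x => decide (p x))).flatMap g := by
  induction l generalizing acc with
  | nil => simp
  | cons y ys ih =>
    by_cases h : p y <;> simp [h, ih, List.append_assoc]

theorem pvFlattenMapSingleton {α β : Type} (l : List α) (f : α → β) :
    (l.map (fun x => [f x])).flatten = l.map f := by
  induction l with
  | nil => rfl
  | cons y ys ih => simp [ih]

-- the Nat→Int list coercion is a map (used to view a fold over a coerced bit list as a fold over its image)
theorem pvCoeListNatInt (l : List Nat) : (l : List Int) = l.map (fun k : Nat => (k : Int)) := by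
  show List.flatMap (fun a : Nat => pure (a : Int)) l = _
  induction l with
  | nil => rfl
  | cons a t ih => simp only [List.flatMap_cons, List.map_cons, ih]; rfl

-- testBit of the or-of-shifts fold: a bit j is set iff some admitted u equals j
theorem pvMaskFold_testBit (l : List Int) (P : Int → Prop) [DecidablePred P]
    (acc : Nat) (j : Nat) (hpos : ∀ u ∈ l, 0 ≤ u) :
    (l.foldl (fun m u => if P u then m ||| (1 <<< u.toNat) else m) acc).testBit j
      = (acc.testBit j || l.any (fun u => decide (P u) && decide (u = (j : Int)))) := by
  induction l generalizing acc with
  | nil => simp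
  | cons y ys ih =>
    have hy : 0 ≤ y := hpos y (List.mem_cons_self)
    have hys : ∀ u ∈ ys, 0 ≤ u := fun u hu => hpos u (List.mem_cons_of_mem _ hu)
    simp only [List.foldl_cons, List.any_cons]
    by_cases h : P y
    · rw [if_pos h, ih _ hys]
      have hby : (1 <<< y.toNat).testBit j = decide (y = (j : Int)) := by
        rw [Nat.shiftLeft_eq, one_mul, Nat.testBit_two_pow]
        rcases Decidable.em (y = (j : Int)) with he | he
        · simp [he]
        · have : y.toNat ≠ j := by omega
          simp [he, this]
      rw [Nat.testBit_or, hby]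
      simp [h, Bool.or_assoc]
    · rw [if_neg h, ih _ hys]
      simp [h]

theorem pvRowMask_testBit (A : List (List Int)) (n v : Int) (j : Nat) :
    (pvRowMask A v n).testBit j
      = ((j : Int) ∈ (PySem.List.pyRange 0 n 1).filter (fun u => decide (pvGetA A v u ≠ 0)) : Bool) := by
  unfold pvRowMask
  rw [pvMaskFold_testBit _ _ _ _ (fun u hu => (PySem.List.mem_pyRange_one.mp hu).1)]
  rw [Bool.eq_iff_iff]
  simp only [Nat.zero_testBit, Bool.false_or, List.any_eq_true, List.mem_filter,
    Bool.and_eq_true, decide_eq_true_eq]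
  constructor
  · rintro ⟨u, hu, hP, rfl⟩; exact ⟨hu, by simpa using hP⟩
  · rintro ⟨hu, hP⟩; exact ⟨(j : Int), hu, by simpa using hP, rfl⟩

-- membership in bits(m, i)
theorem pvBits_mem (m : Nat) : ∀ (i j : Nat), j ∈ pvBits m i ↔ i ≤ j ∧ m.testBit (j - i) = true := by
  induction m using Nat.strong_induction_on with
  | _ m ih =>
    intro i j
    rw [pvBits]
    by_cases hm : m = 0
    · simp [hm]
    · rw [if_neg hm, List.mem_append,
        ih (m / 2) (Nat.bitwise_rec_lemma hm) (i + 1) j]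
      constructor
      · rintro (hj | ⟨hij, ht⟩)
        · have hji : j = i := by
            by_cases h2 : m % 2 = 1 <;> simp [h2] at hj; omega
          have h2 : m % 2 = 1 := by
            by_cases h2 : m % 2 = 1 <;> simp [h2] at hj; exact h2
          refine ⟨le_of_eq hji.symm, ?_⟩
          rw [hji, Nat.sub_self, Nat.testBit_zero]
          simpa using h2
        · refine ⟨by omega, ?_⟩
          have : j - i = (j - (i + 1)) + 1 := by omega
          rw [this, Nat.testBit_add_one]; exact ht
      · rintro ⟨hij, ht⟩
        rcases Nat.eq_or_lt_of_le hij with rfl | hlt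
        · left
          rw [Nat.sub_self, Nat.testBit_zero] at ht
          simp at ht
          simp [ht]
        · right
          refine ⟨by omega, ?_⟩
          have : j - i = (j - (i + 1)) + 1 := by omega
          rw [this, Nat.testBit_add_one] at ht
          exact ht

theorem pvBits_pairwise (m : Nat) : ∀ (i : Nat), (pvBits m i).Pairwise (· < ·) := by
  induction m using Nat.strong_induction_on with
  | _ m ih =>
    intro i
    rw [pvBits]
    by_cases hm : m = 0
    · simp [hm]
    · rw [if_neg hm]
      rw [List.pairwise_append]
      refine ⟨?_, ih (m / 2) (Nat.bitwise_rec_lemma hm) (i + 1), ?_⟩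
      · by_cases h2 : m % 2 = 1 <;> simp [h2]
      · intro x hx y hy
        have hx' : x = i := by
          by_cases h2 : m % 2 = 1 <;> simp [h2] at hx; omega
        have hy' := ((pvBits_mem (m / 2) (i + 1) y).mp hy).1
        omega

-- the bit list of a mask whose characteristic bits equal a filtered range, cast to Int, IS that filter
theorem pvBits_map_eq_filter (m : Nat) (n : Int) (p : Int → Bool)
    (hch : ∀ j : Nat, m.testBit j = ((j : Int) ∈ (PySem.List.pyRange 0 n 1).filter p : Bool)) :
    (pvBits m 0).map (fun k : Nat => (k : Int)) = (PySem.List.pyRange 0 n 1).filter p := by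
  have hpwL : ((pvBits m 0).map (fun k : Nat => (k : Int))).Pairwise (· < ·) := by
    rw [List.pairwise_map]
    exact (pvBits_pairwise m 0).imp (fun h => by exact_mod_cast h)
  have hpwR : ((PySem.List.pyRange 0 n 1).filter p).Pairwise (· < ·) :=
    List.Pairwise.filter _ (PySem.List.pairwise_lt_pyRange_one 0 n)
  have hndL := hpwL.imp (fun h => ne_of_lt h)
  have hndR := hpwR.imp (fun h => ne_of_lt h)
  have hmem : ∀ x : Int, x ∈ (pvBits m 0).map (fun k : Nat => (k : Int))
      ↔ x ∈ (PySem.List.pyRange 0 n 1).filter p := by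
    intro x
    simp only [List.mem_map]
    constructor
    · rintro ⟨k, hk, rfl⟩
      have := ((pvBits_mem m 0 k).mp hk).2
      simp only [Nat.sub_zero] at this
      rw [hch k] at this
      exact of_decide_eq_true this
    · intro hx
      have hx0 : 0 ≤ x := by
        have := (List.mem_filter.mp hx).1
        exact (PySem.List.mem_pyRange_one.mp this).1
      refine ⟨x.toNat, ?_, Int.toNat_of_nonneg hx0⟩
      rw [pvBits_mem]
      refine ⟨Nat.zero_le _, ?_⟩
      rw [Nat.sub_zero, hch]
      rw [Int.toNat_of_nonneg hx0]
      exact decide_eq_true hx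
  have hperm := (List.perm_ext_iff_of_nodup hndL hndR).mpr hmem
  exact List.Perm.eq_of_pairwise (fun a b _ _ h1 h2 => absurd h1 (lt_asymm h2)) hpwL hpwR hperm

-- row[v] under pyGetD
theorem pvRows_get (A : List (List Int)) (n v : Int) (h0 : 0 ≤ v) (h1 : v < n) :
    PySem.List.pyGetD (pvRows A n) v 0 = pvRowMask A v n := by
  unfold pvRows
  rw [PySem.List.foldl_append_singleton_eq_map]
  simp only [List.nil_append]
  exact PySem.List.pyGetD_map_pyRange_of_nonneg _ _ _ _ h0 h1

-- the single mask's bit list, as Ints, is A's neighbor filter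
theorem pvBitsRow_eq (A : List (List Int)) (n v : Int) :
    (pvBits (pvRowMask A v n) 0).map (fun k : Nat => (k : Int))
      = (PySem.List.pyRange 0 n 1).filter (fun u => decide (pvGetA A v u ≠ 0)) :=
  pvBits_map_eq_filter _ _ _ (fun j => pvRowMask_testBit A n v j)

-- the AND mask's bit list, as Ints, is the common-neighbor filter
theorem pvBitsAnd_eq (A : List (List Int)) (n v w : Int) :
    (pvBits (pvRowMask A v n &&& pvRowMask A w n) 0).map (fun k : Nat => (k : Int))
      = (PySem.List.pyRange 0 n 1).filter
          (fun u => decide (pvGetA A v u ≠ 0) && decide (pvGetA A w u ≠ 0)) := by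
  apply pvBits_map_eq_filter
  intro j
  rw [Nat.testBit_and, pvRowMask_testBit, pvRowMask_testBit]
  rw [Bool.eq_iff_iff]
  simp only [Bool.and_eq_true, decide_eq_true_eq, List.mem_filter, Bool.and_eq_true]
  tauto

theorem find_DT_paths_eq_alt (A : List (List Int)) (n : Int) :
    find_DT_paths A n = find_DT_paths_alt A n := by
  -- A side: normalize the guarded folds to flatMaps over filtered ranges
  have hd : ∀ (a b c : Int) (dt : List (Int × Int × Int × Int)),
      (PySem.List.pyRange 0 n 1).foldl (fun dt d =>
          if d = a ∨ d = b ∨ d = c ∨ pvGetA A c d = 0 then dt else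
          if pvGetA A b d ≠ 0 then dt ++ [(a, b, c, d)] else dt) dt
      = dt ++ ((PySem.List.pyRange 0 n 1).filter (fun d =>
          decide (d ≠ c ∧ d ≠ b ∧ d ≠ a ∧ pvGetA A c d ≠ 0 ∧ pvGetA A b d ≠ 0))).map
            (fun d => (a, b, c, d)) := by
    intro a b c dt
    have h1 := PySem.List.foldl_congr_mem
      (l := PySem.List.pyRange 0 n 1) (init := dt)
      (f := fun dt d => if d = a ∨ d = b ∨ d = c ∨ pvGetA A c d = 0 then dt
                        else if pvGetA A b d ≠ 0 then dt ++ [(a, b, c, d)] else dt)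
      (g := fun dt d => if d ≠ c ∧ d ≠ b ∧ d ≠ a ∧ pvGetA A c d ≠ 0 ∧ pvGetA A b d ≠ 0
                        then dt ++ [(a, b, c, d)] else dt)
      (by intro acc x _; dsimp only; split_ifs <;> first | rfl | tauto)
    rw [h1, pvFoldlGuard]
    simp only [List.flatMap]
    rw [pvFlattenMapSingleton]
  have hc : ∀ (a b : Int) (dt : List (Int × Int × Int × Int)),
      (PySem.List.pyRange 0 n 1).foldl (fun dt c =>
          if c = a ∨ c = b ∨ pvGetA A b c = 0 then dt else
          if pvGetA A a c = 0 then dt else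
          (PySem.List.pyRange 0 n 1).foldl (fun dt d =>
            if d = a ∨ d = b ∨ d = c ∨ pvGetA A c d = 0 then dt else
            if pvGetA A b d ≠ 0 then dt ++ [(a, b, c, d)] else dt) dt) dt
      = dt ++ ((PySem.List.pyRange 0 n 1).filter (fun c =>
          decide (c ≠ b ∧ c ≠ a ∧ pvGetA A b c ≠ 0 ∧ pvGetA A a c ≠ 0))).flatMap
            (fun c => ((PySem.List.pyRange 0 n 1).filter (fun d =>
              decide (d ≠ c ∧ d ≠ b ∧ d ≠ a ∧ pvGetA A c d ≠ 0 ∧ pvGetA A b d ≠ 0))).map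
                (fun d => (a, b, c, d))) := by
    intro a b dt
    have h1 := PySem.List.foldl_congr_mem
      (l := PySem.List.pyRange 0 n 1) (init := dt)
      (f := fun dt c =>
          if c = a ∨ c = b ∨ pvGetA A b c = 0 then dt else
          if pvGetA A a c = 0 then dt else
          (PySem.List.pyRange 0 n 1).foldl (fun dt d =>
            if d = a ∨ d = b ∨ d = c ∨ pvGetA A c d = 0 then dt else
            if pvGetA A b d ≠ 0 then dt ++ [(a, b, c, d)] else dt) dt)
      (g := fun dt c =>
          if c ≠ b ∧ c ≠ a ∧ pvGetA A b c ≠ 0 ∧ pvGetA A a c ≠ 0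
          then dt ++ ((PySem.List.pyRange 0 n 1).filter (fun d =>
              decide (d ≠ c ∧ d ≠ b ∧ d ≠ a ∧ pvGetA A c d ≠ 0 ∧ pvGetA A b d ≠ 0))).map
                (fun d => (a, b, c, d)) else dt)
      (by intro acc x _; dsimp only; rw [hd]; split_ifs <;> first | rfl | tauto)
    rw [h1, pvFoldlGuard]
  have hb : ∀ (a : Int) (dt : List (Int × Int × Int × Int)),
      (PySem.List.pyRange 0 n 1).foldl (fun dt b =>
          if b = a ∨ pvGetA A a b = 0 then dt else
          (PySem.List.pyRange 0 n 1).foldl (fun dt c =>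
            if c = a ∨ c = b ∨ pvGetA A b c = 0 then dt else
            if pvGetA A a c = 0 then dt else
            (PySem.List.pyRange 0 n 1).foldl (fun dt d =>
              if d = a ∨ d = b ∨ d = c ∨ pvGetA A c d = 0 then dt else
              if pvGetA A b d ≠ 0 then dt ++ [(a, b, c, d)] else dt) dt) dt) dt
      = dt ++ ((PySem.List.pyRange 0 n 1).filter (fun b =>
          decide (b ≠ a ∧ pvGetA A a b ≠ 0))).flatMap
            (fun b => ((PySem.List.pyRange 0 n 1).filter (fun c =>
              decide (c ≠ b ∧ c ≠ a ∧ pvGetA A b c ≠ 0 ∧ pvGetA A a c ≠ 0))).flatMap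
                (fun c => ((PySem.List.pyRange 0 n 1).filter (fun d =>
                  decide (d ≠ c ∧ d ≠ b ∧ d ≠ a ∧ pvGetA A c d ≠ 0 ∧ pvGetA A b d ≠ 0))).map
                    (fun d => (a, b, c, d)))) := by
    intro a dt
    have h1 := PySem.List.foldl_congr_mem
      (l := PySem.List.pyRange 0 n 1) (init := dt)
      (f := fun dt b =>
          if b = a ∨ pvGetA A a b = 0 then dt else
          (PySem.List.pyRange 0 n 1).foldl (fun dt c =>
            if c = a ∨ c = b ∨ pvGetA A b c = 0 then dt else
            if pvGetA A a c = 0 then dt else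
            (PySem.List.pyRange 0 n 1).foldl (fun dt d =>
              if d = a ∨ d = b ∨ d = c ∨ pvGetA A c d = 0 then dt else
              if pvGetA A b d ≠ 0 then dt ++ [(a, b, c, d)] else dt) dt) dt)
      (g := fun dt b =>
          if b ≠ a ∧ pvGetA A a b ≠ 0
          then dt ++ ((PySem.List.pyRange 0 n 1).filter (fun c =>
              decide (c ≠ b ∧ c ≠ a ∧ pvGetA A b c ≠ 0 ∧ pvGetA A a c ≠ 0))).flatMap
                (fun c => ((PySem.List.pyRange 0 n 1).filter (fun d =>
                  decide (d ≠ c ∧ d ≠ b ∧ d ≠ a ∧ pvGetA A c d ≠ 0 ∧ pvGetA A b d ≠ 0))).map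
                    (fun d => (a, b, c, d))) else dt)
      (by intro acc x _; dsimp only; rw [hc]; split_ifs <;> first | rfl | tauto)
    rw [h1, pvFoldlGuard]
  have hA : find_DT_paths A n
      = (PySem.List.pyRange 0 n 1).flatMap
          (fun a => ((PySem.List.pyRange 0 n 1).filter (fun b =>
            decide (b ≠ a ∧ pvGetA A a b ≠ 0))).flatMap
              (fun b => ((PySem.List.pyRange 0 n 1).filter (fun c =>
                decide (c ≠ b ∧ c ≠ a ∧ pvGetA A b c ≠ 0 ∧ pvGetA A a c ≠ 0))).flatMap
                  (fun c => ((PySem.List.pyRange 0 n 1).filter (fun d =>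
                    decide (d ≠ c ∧ d ≠ b ∧ d ≠ a ∧ pvGetA A c d ≠ 0 ∧ pvGetA A b d ≠ 0))).map
                      (fun d => (a, b, c, d))))) := by
    unfold find_DT_paths
    have h1 := PySem.List.foldl_congr_mem
      (l := PySem.List.pyRange 0 n 1) (init := ([] : List (Int × Int × Int × Int)))
      (f := fun dt a =>
          (PySem.List.pyRange 0 n 1).foldl (fun dt b =>
            if b = a ∨ pvGetA A a b = 0 then dt else
            (PySem.List.pyRange 0 n 1).foldl (fun dt c =>
              if c = a ∨ c = b ∨ pvGetA A b c = 0 then dt else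
              if pvGetA A a c = 0 then dt else
              (PySem.List.pyRange 0 n 1).foldl (fun dt d =>
                if d = a ∨ d = b ∨ d = c ∨ pvGetA A c d = 0 then dt else
                if pvGetA A b d ≠ 0 then dt ++ [(a, b, c, d)] else dt) dt) dt) dt)
      (g := fun dt a =>
          dt ++ ((PySem.List.pyRange 0 n 1).filter (fun b =>
            decide (b ≠ a ∧ pvGetA A a b ≠ 0))).flatMap
              (fun b => ((PySem.List.pyRange 0 n 1).filter (fun c =>
                decide (c ≠ b ∧ c ≠ a ∧ pvGetA A b c ≠ 0 ∧ pvGetA A a c ≠ 0))).flatMap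
                  (fun c => ((PySem.List.pyRange 0 n 1).filter (fun d =>
                    decide (d ≠ c ∧ d ≠ b ∧ d ≠ a ∧ pvGetA A c d ≠ 0 ∧ pvGetA A b d ≠ 0))).map
                      (fun d => (a, b, c, d)))))
      (by intro acc x _; dsimp only; rw [hb])
    rw [h1, PySem.List.foldl_append_eq_flatMap]
    simp
  -- B side: each bit-list fold is a fold over its Int image, which is a filtered range;
  -- then the same guarded-fold normalization as on the A side applies
  have hfm : ∀ {γ : Type} (m : Nat) (g : γ → Int → γ) (init : γ),
      List.foldl g init ((pvBits m 0 : List Nat) : List Int)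
        = ((pvBits m 0).map (fun k : Nat => (k : Int))).foldl g init := by
    intro γ m g init; rw [pvCoeListNatInt]
  have hdB : ∀ (a b c : Int), 0 ≤ b → b < n → 0 ≤ c → c < n →
      ∀ (dt : List (Int × Int × Int × Int)),
      (pvBits (PySem.List.pyGetD (pvRows A n) b 0 &&& PySem.List.pyGetD (pvRows A n) c 0) 0).foldl
        (fun dt d =>
          if (d : Int) = a ∨ (d : Int) = b ∨ (d : Int) = c then dt
          else dt ++ [(a, b, c, (d : Int))]) dt
      = dt ++ ((PySem.List.pyRange 0 n 1).filter (fun d =>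
          decide (d ≠ c ∧ d ≠ b ∧ d ≠ a ∧ pvGetA A c d ≠ 0 ∧ pvGetA A b d ≠ 0))).map
            (fun d => (a, b, c, d)) := by
    intro a b c hb0 hbn hc0 hcn dt
    rw [pvRows_get A n b hb0 hbn, pvRows_get A n c hc0 hcn]
    rw [hfm, pvBitsAnd_eq A n b c]
    have h1 := PySem.List.foldl_congr_mem
      (l := (PySem.List.pyRange 0 n 1).filter
        (fun u => decide (pvGetA A b u ≠ 0) && decide (pvGetA A c u ≠ 0)))
      (init := dt)
      (f := fun dt (d : Int) => if d = a ∨ d = b ∨ d = c then dt else dt ++ [(a, b, c, d)])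
      (g := fun dt (d : Int) => if d ≠ a ∧ d ≠ b ∧ d ≠ c then dt ++ [(a, b, c, d)] else dt)
      (by intro acc x _; dsimp only; split_ifs <;> first | rfl | tauto)
    rw [h1, pvFoldlGuard, List.filter_filter]
    congr 1
    rw [List.filter_congr (q := fun d =>
        decide (d ≠ c ∧ d ≠ b ∧ d ≠ a ∧ pvGetA A c d ≠ 0 ∧ pvGetA A b d ≠ 0))
      (fun d _ => by rw [Bool.eq_iff_iff]; simp only [Bool.and_eq_true, decide_eq_true_eq]; tauto)]
    simp only [List.flatMap]
    rw [pvFlattenMapSingleton]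
  have hcB : ∀ (a b : Int), 0 ≤ b → b < n →
      ∀ (dt : List (Int × Int × Int × Int)),
      (pvBits (pvRowMask A a n &&& PySem.List.pyGetD (pvRows A n) b 0) 0).foldl
        (fun dt c =>
          if (c : Int) = a ∨ (c : Int) = b then dt
          else (pvBits (PySem.List.pyGetD (pvRows A n) b 0 &&& PySem.List.pyGetD (pvRows A n) (c : Int) 0) 0).foldl
            (fun dt d =>
              if (d : Int) = a ∨ (d : Int) = b ∨ (d : Int) = (c : Int) then dt
              else dt ++ [(a, b, (c : Int), (d : Int))]) dt) dt
      = dt ++ ((PySem.List.pyRange 0 n 1).filter (fun c =>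
          decide (c ≠ b ∧ c ≠ a ∧ pvGetA A b c ≠ 0 ∧ pvGetA A a c ≠ 0))).flatMap
            (fun c => ((PySem.List.pyRange 0 n 1).filter (fun d =>
              decide (d ≠ c ∧ d ≠ b ∧ d ≠ a ∧ pvGetA A c d ≠ 0 ∧ pvGetA A b d ≠ 0))).map
                (fun d => (a, b, c, d))) := by
    intro a b hb0 hbn dt
    rw [pvRows_get A n b hb0 hbn]
    rw [hfm, pvBitsAnd_eq A n a b]
    have h1 := PySem.List.foldl_congr_mem
      (l := (PySem.List.pyRange 0 n 1).filter
        (fun u => decide (pvGetA A a u ≠ 0) && decide (pvGetA A b u ≠ 0)))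
      (init := dt)
      (f := fun dt (c : Int) =>
        if c = a ∨ c = b then dt
        else (pvBits (pvRowMask A b n &&& PySem.List.pyGetD (pvRows A n) c 0) 0).foldl
          (fun dt d =>
            if (d : Int) = a ∨ (d : Int) = b ∨ (d : Int) = c then dt
            else dt ++ [(a, b, c, (d : Int))]) dt)
      (g := fun dt (c : Int) =>
        if c ≠ a ∧ c ≠ b then
          dt ++ ((PySem.List.pyRange 0 n 1).filter (fun d =>
            decide (d ≠ c ∧ d ≠ b ∧ d ≠ a ∧ pvGetA A c d ≠ 0 ∧ pvGetA A b d ≠ 0))).map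
              (fun d => (a, b, c, d))
        else dt)
      ?_
    · rw [h1, pvFoldlGuard, List.filter_filter]
      congr 1
      rw [List.filter_congr (q := fun c =>
          decide (c ≠ b ∧ c ≠ a ∧ pvGetA A b c ≠ 0 ∧ pvGetA A a c ≠ 0))
        (fun c _ => by rw [Bool.eq_iff_iff]; simp only [Bool.and_eq_true, decide_eq_true_eq]; tauto)]
    intro acc c hcmem
    obtain ⟨hcr, _⟩ := List.mem_filter.mp hcmem
    obtain ⟨hcg0, hcgn⟩ := PySem.List.mem_pyRange_one.mp hcr
    dsimp only
    split_ifs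
    all_goals first
      | rfl
      | tauto
      | (rw [← pvRows_get A n b hb0 hbn, hdB a b c hb0 hbn hcg0 hcgn acc])
  have hB : find_DT_paths_alt A n
      = (PySem.List.pyRange 0 n 1).flatMap
          (fun a => ((PySem.List.pyRange 0 n 1).filter (fun b =>
            decide (b ≠ a ∧ pvGetA A a b ≠ 0))).flatMap
              (fun b => ((PySem.List.pyRange 0 n 1).filter (fun c =>
                decide (c ≠ b ∧ c ≠ a ∧ pvGetA A b c ≠ 0 ∧ pvGetA A a c ≠ 0))).flatMap
                  (fun c => ((PySem.List.pyRange 0 n 1).filter (fun d =>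
                    decide (d ≠ c ∧ d ≠ b ∧ d ≠ a ∧ pvGetA A c d ≠ 0 ∧ pvGetA A b d ≠ 0))).map
                      (fun d => (a, b, c, d))))) := by
    unfold find_DT_paths_alt
    dsimp only
    have h1 := PySem.List.foldl_congr_mem
      (l := PySem.List.pyRange 0 n 1) (init := ([] : List (Int × Int × Int × Int)))
      (f := fun dt a =>
        (pvBits (PySem.List.pyGetD (pvRows A n) a 0) 0).foldl (fun dt b =>
          if (b : Int) = a then dt else
          (pvBits (PySem.List.pyGetD (pvRows A n) a 0 &&& PySem.List.pyGetD (pvRows A n) (b : Int) 0) 0).foldl (fun dt c =>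
            if (c : Int) = a ∨ (c : Int) = (b : Int) then dt else
            (pvBits (PySem.List.pyGetD (pvRows A n) (b : Int) 0 &&& PySem.List.pyGetD (pvRows A n) (c : Int) 0) 0).foldl (fun dt d =>
              if (d : Int) = a ∨ (d : Int) = (b : Int) ∨ (d : Int) = (c : Int) then dt else
              dt ++ [(a, (b : Int), (c : Int), (d : Int))]) dt) dt) dt)
      (g := fun dt a =>
          dt ++ ((PySem.List.pyRange 0 n 1).filter (fun b =>
            decide (b ≠ a ∧ pvGetA A a b ≠ 0))).flatMap
              (fun b => ((PySem.List.pyRange 0 n 1).filter (fun c =>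
                decide (c ≠ b ∧ c ≠ a ∧ pvGetA A b c ≠ 0 ∧ pvGetA A a c ≠ 0))).flatMap
                  (fun c => ((PySem.List.pyRange 0 n 1).filter (fun d =>
                    decide (d ≠ c ∧ d ≠ b ∧ d ≠ a ∧ pvGetA A c d ≠ 0 ∧ pvGetA A b d ≠ 0))).map
                      (fun d => (a, b, c, d)))))
      ?_
    · rw [h1, PySem.List.foldl_append_eq_flatMap]; simp
    intro dt a ha
    obtain ⟨ha0, han⟩ := PySem.List.mem_pyRange_one.mp ha
    dsimp only
    rw [pvRows_get A n a ha0 han]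
    rw [hfm, pvBitsRow_eq A n a]
    have h2 := PySem.List.foldl_congr_mem
      (l := (PySem.List.pyRange 0 n 1).filter (fun u => decide (pvGetA A a u ≠ 0)))
      (init := dt)
      (f := fun dt (b : Int) =>
        if b = a then dt else
        (pvBits (pvRowMask A a n &&& PySem.List.pyGetD (pvRows A n) b 0) 0).foldl (fun dt c =>
          if (c : Int) = a ∨ (c : Int) = b then dt else
          (pvBits (PySem.List.pyGetD (pvRows A n) b 0 &&& PySem.List.pyGetD (pvRows A n) (c : Int) 0) 0).foldl (fun dt d =>
            if (d : Int) = a ∨ (d : Int) = b ∨ (d : Int) = (c : Int) then dt else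
            dt ++ [(a, b, (c : Int), (d : Int))]) dt) dt)
      (g := fun dt (b : Int) =>
        if b ≠ a then
          dt ++ ((PySem.List.pyRange 0 n 1).filter (fun c =>
            decide (c ≠ b ∧ c ≠ a ∧ pvGetA A b c ≠ 0 ∧ pvGetA A a c ≠ 0))).flatMap
              (fun c => ((PySem.List.pyRange 0 n 1).filter (fun d =>
                decide (d ≠ c ∧ d ≠ b ∧ d ≠ a ∧ pvGetA A c d ≠ 0 ∧ pvGetA A b d ≠ 0))).map
                  (fun d => (a, b, c, d)))
        else dt)
      ?_
    · rw [h2, pvFoldlGuard, List.filter_filter]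
      congr 1
      rw [List.filter_congr (q := fun b => decide (b ≠ a ∧ pvGetA A a b ≠ 0))
        (fun b _ => by rw [Bool.eq_iff_iff]; simp only [Bool.and_eq_true, decide_eq_true_eq])]
    intro acc b hbmem
    obtain ⟨hbr, _⟩ := List.mem_filter.mp hbmem
    obtain ⟨hbg0, hbgn⟩ := PySem.List.mem_pyRange_one.mp hbr
    dsimp only
    split_ifs
    all_goals first | rfl | tauto
  rw [hA, hB]

-- ===== VERDICT (by name: the statement is the Claim_ definition above) =====
theorem find_DT_paths_spec : Claim_equal_find_DT_paths := by
  intro A n _ _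
  unfold Spec_find_DT_paths
  exact find_DT_paths_eq_alt A n
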